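-- pv_equiv track=rewrite | github.com/MananSoni42/kaliteeri | utils.py | calc_winners
-- ===== SOURCE A (Python) =====
-- def calc_winners(cards, players, tcards, player_points, bidder):
--     teammates = []
--     non_teammates = []
--     for player in players:
--         for card in cards[player]:
--             if card in tcards or player == bidder:
--                 teammates.append(player)
--                 break
--         else:
--             non_teammates.append(player)
--
--     pts = 0
--     for ind,player in enumerate(players):
--         if player in teammates:
--             pts += player_points[ind][1]
--
--     return teammates, non_teammates, pts
-- ===== SOURCE B (Python) =====
-- def calc_winners(cards, players, tcards, player_points, bidder):
--     teammates, non_teammates, pts = [], [], 0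
--     for ind, player in enumerate(players):
--         if any(card in tcards or player == bidder for card in cards[player]):
--             teammates.append(player)
--             pts += player_points[ind][1]
--         else:
--             non_teammates.append(player)
--     return teammates, non_teammates, pts
-- ===== Notes on version B (the rewrite author's own statement) =====
-- stated objective: simpler
-- what changed: B is a single fused pass: each player is classified by one any(...) predicate and, on a match, their points are tallied immediately, eliminating A's for/else break, its entire second summation loop and the linear 'player in teammates' scan inside it; Pre_ excludes only the inputs on which A raises (KeyError for a player missing from cards, IndexError when player_points lacks a row of length >= 2 at a teammate's index).
import Mathlib
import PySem

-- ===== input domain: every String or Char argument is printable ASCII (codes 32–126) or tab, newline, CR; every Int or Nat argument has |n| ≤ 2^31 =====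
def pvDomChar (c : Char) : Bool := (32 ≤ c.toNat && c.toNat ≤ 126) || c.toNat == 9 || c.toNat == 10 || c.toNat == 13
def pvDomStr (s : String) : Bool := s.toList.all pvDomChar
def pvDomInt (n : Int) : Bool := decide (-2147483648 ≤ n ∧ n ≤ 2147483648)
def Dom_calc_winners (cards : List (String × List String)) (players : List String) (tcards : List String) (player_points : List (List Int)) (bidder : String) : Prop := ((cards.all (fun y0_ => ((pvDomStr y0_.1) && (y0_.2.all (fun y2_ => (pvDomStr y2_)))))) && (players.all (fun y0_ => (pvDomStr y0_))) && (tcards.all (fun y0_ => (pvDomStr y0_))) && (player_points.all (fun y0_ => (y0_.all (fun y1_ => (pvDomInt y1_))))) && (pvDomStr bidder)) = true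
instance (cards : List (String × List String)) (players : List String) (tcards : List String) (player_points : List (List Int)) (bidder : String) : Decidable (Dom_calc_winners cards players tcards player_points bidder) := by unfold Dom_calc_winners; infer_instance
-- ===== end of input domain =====

-- B replaces A's two passes (a for/else partition loop, then a separate summation loop doing a
-- linear 'player in teammates' scan) by ONE fused pass that classifies each player with a single
-- any(...) predicate and tallies the points immediately on a match (objective: simpler).

-- ===== PORT A =====
-- inner 'for card in cards[player]: if card in tcards or player == bidder: … break / else: …'
def pvHitA (pc : List String) (tcards : List String) (player bidder : String) : Bool :=
  match pc with
  | [] => false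
  | c :: rest => if tcards.contains c || player == bidder then true
                 else pvHitA rest tcards player bidder

def calc_winners (cards : List (String × List String)) (players : List String) (tcards : List String) (player_points : List (List Int)) (bidder : String) : List String × List String × Int :=
  -- first loop: partition players via the inner scan (cards[player] returns under Pre_; getD [] where Python raises KeyError)
  let tnt : List String × List String :=
    players.foldl (fun acc player =>
      if pvHitA ((PySem.Dict.mk cards).get? player |>.getD []) tcards player bidder
      then (acc.1 ++ [player], acc.2)
      else (acc.1, acc.2 ++ [player])) ([], [])
  -- second loop: for ind, player in enumerate(players): if player in teammates: pts += player_points[ind][1]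
  let pts : Int :=
    (PySem.List.enumerate players 0).foldl (fun pts ip =>
      if tnt.1.contains ip.2
      then pts + ((PySem.List.pyGet? ((PySem.List.pyGet? player_points ip.1).getD []) 1).getD 0)
      else pts) 0
  (tnt.1, tnt.2, pts)

-- ===== PORT B =====
-- any(card in tcards or player == bidder for card in cards[player])
def pvFlagB (cards : List (String × List String)) (tcards : List String) (bidder p : String) : Bool :=
  (((PySem.Dict.mk cards).get? p).getD []).any (fun c => tcards.contains c || p == bidder)

def calc_winners_alt (cards : List (String × List String)) (players : List String) (tcards : List String) (player_points : List (List Int)) (bidder : String) : List String × List String × Int :=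
  -- single fused loop over enumerate(players) with accumulator (teammates, non_teammates, pts)
  (PySem.List.enumerate players 0).foldl (fun acc ip =>
    if pvFlagB cards tcards bidder ip.2
    then (acc.1 ++ [ip.2], acc.2.1,
          acc.2.2 + ((PySem.List.pyGet? ((PySem.List.pyGet? player_points ip.1).getD []) 1).getD 0))
    else (acc.1, acc.2.1 ++ [ip.2], acc.2.2))
    ([], [], 0)

-- ===== PRECONDITION & SPEC =====
-- Pre_ excludes exactly the inputs on which Python A raises: a player missing from the cards
-- dict (KeyError), or a teammate position ind where player_points[ind][1] does not exist (IndexError).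
def Pre_calc_winners (cards : List (String × List String)) (players : List String) (tcards : List String) (player_points : List (List Int)) (bidder : String) : Prop :=
  (∀ p ∈ players, ((PySem.Dict.mk cards).get? p).isSome) ∧
  (∀ i ∈ List.range players.length,
    (∃ c ∈ ((PySem.Dict.mk cards).get? (players.getD i "")).getD [],
        c ∈ tcards ∨ players.getD i "" = bidder) →
    i < player_points.length ∧ 2 ≤ (player_points.getD i []).length)
instance (cards : List (String × List String)) (players : List String) (tcards : List String) (player_points : List (List Int)) (bidder : String) : Decidable (Pre_calc_winners cards players tcards player_points bidder) := by unfold Pre_calc_winners; infer_instance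

def pvWitness_calc_winners : (List (String × List String)) × List String × List String × List (List Int) × String :=
  ([("a", ["x"]), ("b", ["y"])], ["a", "b"], ["x"], [[0, 3], [0, 5]], "c")

def Spec_calc_winners (cards : List (String × List String)) (players : List String) (tcards : List String) (player_points : List (List Int)) (bidder : String) (out : List String × List String × Int) : Prop := out = calc_winners_alt cards players tcards player_points bidder
instance (cards : List (String × List String)) (players : List String) (tcards : List String) (player_points : List (List Int)) (bidder : String) (out : List String × List String × Int) : Decidable (Spec_calc_winners cards players tcards player_points bidder out) := by unfold Spec_calc_winners; infer_instance

-- ===== CLAIM (what is proved, stated in full; the proofs are below) =====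
def Claim_equal_calc_winners : Prop := ∀ (cards : List (String × List String)) (players : List String) (tcards : List String) (player_points : List (List Int)) (bidder : String), Dom_calc_winners cards players tcards player_points bidder → Pre_calc_winners cards players tcards player_points bidder → Spec_calc_winners cards players tcards player_points bidder (calc_winners cards players tcards player_points bidder)

-- ===== LEMMAS AND PROOFS =====

-- A's inner break-scan returns exactly B's any(...) predicate
lemma hitA_eq_flagB (cards : List (String × List String)) (tcards : List String) (bidder p : String) :
    pvHitA ((PySem.Dict.mk cards).get? p |>.getD []) tcards p bidder
      = pvFlagB cards tcards bidder p := by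
  unfold pvFlagB
  induction ((PySem.Dict.mk cards).get? p |>.getD []) with
  | nil => rfl
  | cons c rest ih =>
    simp only [pvHitA, List.any_cons]
    cases htc : tcards.contains c <;> cases hb : p == bidder <;> simp [ih, hb]

-- A's partition foldl produces the two filters
lemma partition_foldl (f : String → Bool) :
    ∀ (ps : List String) (t n : List String),
      ps.foldl (fun acc player =>
        if f player then (acc.1 ++ [player], acc.2) else (acc.1, acc.2 ++ [player])) (t, n)
      = (t ++ ps.filter f, n ++ ps.filter (fun p => !f p)) := by
  intro ps
  induction ps with
  | nil => simp
  | cons p rest ih =>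
    intro t n
    cases h : f p <;> simp [h, List.foldl_cons, ih]

-- membership in the filtered list is just the flag
lemma contains_filter (f : String → Bool) (ps : List String) (p : String) (hp : p ∈ ps) :
    (ps.filter f).contains p = f p := by
  cases h : f p <;> simp [List.mem_filter, h, hp]

-- B's fused fold splits into A's two filters plus the flag-based tally fold
lemma fused_foldl (f : String → Bool) (add : Int → Int) :
    ∀ (ps : List String) (k : Int) (t n : List String) (s : Int),
      (PySem.List.enumerate ps k).foldl (fun acc ip =>
        if f ip.2 then (acc.1 ++ [ip.2], acc.2.1, acc.2.2 + add ip.1)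
        else (acc.1, acc.2.1 ++ [ip.2], acc.2.2)) (t, n, s)
      = (t ++ ps.filter f, n ++ ps.filter (fun p => !f p),
         (PySem.List.enumerate ps k).foldl (fun s ip => if f ip.2 then s + add ip.1 else s) s) := by
  intro ps
  induction ps with
  | nil => intro k t n s; simp [PySem.List.enumerate_nil]
  | cons p rest ih =>
    intro k t n s
    rw [PySem.List.enumerate_cons]
    cases h : f p <;> simp [h, List.foldl_cons, ih]

-- ===== VERDICT (by name: the statement is the Claim_ definition above) =====
theorem calc_winners_spec : Claim_equal_calc_winners := by
  intro cards players tcards player_points bidder _hdom _hpre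
  unfold Spec_calc_winners calc_winners calc_winners_alt
  have hf := hitA_eq_flagB cards tcards bidder
  set f := pvFlagB cards tcards bidder with hfdef
  simp only [hf]
  rw [partition_foldl f players [] [],
      fused_foldl f (fun i => ((PySem.List.pyGet? ((PySem.List.pyGet? player_points i).getD []) 1).getD 0)) players 0 [] [] 0]
  simp only [List.nil_append, Prod.mk.injEq]
  refine ⟨trivial, trivial, ?_⟩
  refine PySem.List.foldl_congr_mem (PySem.List.enumerate players 0) _ _ 0 ?_
  intro acc ip hip
  have hmem : ip.2 ∈ players := by
    rcases (PySem.List.mem_enumerate_iff players 0 ip).1 hip with ⟨k, hk, rfl⟩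
    exact List.getElem_mem hk
  simp only [contains_filter f players ip.2 hmem]
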